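-- pv_equiv track=rewrite | github.com/imteekay/algorithms | coding_interviews/leetcode/medium/minimum_number_of_operations_to_move_all_balls_to_each_box/minimum_number_of_operations_to_move_all_balls_to_each_box.py | sum_moves
-- ===== SOURCE A (Python) =====
-- def sum_moves(answer, boxes, boxes_indices):
--     moves, number_of_balls_seen = 0, 0
--
--     for index in boxes_indices:
--         answer[index] += moves
--
--         if boxes[index] == '1':
--             number_of_balls_seen += 1
--
--         moves += number_of_balls_seen
--
--     return answer
-- ===== SOURCE B (Python) =====
-- def sum_moves(answer, boxes, boxes_indices):
--     for k, i in enumerate(boxes_indices):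
--         answer[i] += sum(k - m for m in range(k) if boxes[boxes_indices[m]] == '1')
--     return answer
-- ===== Notes on version B (the rewrite author's own statement) =====
-- stated objective: alternative
-- what changed: replaces A's single pass with running accumulators (moves, number_of_balls_seen) by an explicit nested double sum: for each traversal position k it recomputes the cost as the sum of (k - m) over earlier positions m whose box holds a ball
import Mathlib
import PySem

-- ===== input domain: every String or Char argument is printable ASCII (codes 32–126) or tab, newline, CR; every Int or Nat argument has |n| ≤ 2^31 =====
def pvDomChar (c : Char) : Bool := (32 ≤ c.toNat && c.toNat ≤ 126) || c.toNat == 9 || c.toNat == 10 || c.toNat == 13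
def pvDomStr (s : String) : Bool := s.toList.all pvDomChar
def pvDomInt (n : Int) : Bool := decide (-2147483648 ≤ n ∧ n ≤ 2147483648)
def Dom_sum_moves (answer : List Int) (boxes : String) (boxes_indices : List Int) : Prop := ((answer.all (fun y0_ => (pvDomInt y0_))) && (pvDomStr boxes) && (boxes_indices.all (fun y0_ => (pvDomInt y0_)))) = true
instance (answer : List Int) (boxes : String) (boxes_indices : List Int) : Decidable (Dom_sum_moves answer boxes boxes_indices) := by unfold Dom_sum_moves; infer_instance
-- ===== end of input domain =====

-- B replaces A's running accumulators (moves, number_of_balls_seen) by an explicit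
-- nested sum over earlier traversal positions holding balls (objective: alternative,
-- O(n) → O(n^2)). Both A and B mutate `answer` in place identically; the equivalence
-- proved here is about the returned value.

-- ===== PORT A =====
def sum_moves (answer : List Int) (boxes : String) (boxes_indices : List Int) : List Int :=
  (boxes_indices.foldl
    (fun (st : List Int × Int × Int) index =>
      let ans := PySem.List.pySetD st.1 index (PySem.List.pyGetD st.1 index 0 + st.2.1)
      let seen := if PySem.Str.pyGet? boxes index = some '1' then st.2.2 + 1 else st.2.2
      (ans, st.2.1 + seen, seen))
    (answer, 0, 0)).1

-- ===== PORT B =====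
def sum_moves_alt (answer : List Int) (boxes : String) (boxes_indices : List Int) : List Int :=
  (PySem.List.enumerate boxes_indices 0).foldl
    (fun ans ki =>
      let cost := (PySem.List.pyRange 0 ki.1 1).foldl
        (fun s m =>
          if PySem.Str.pyGet? boxes (PySem.List.pyGetD boxes_indices m 0) = some '1'
          then s + (ki.1 - m) else s) 0
      PySem.List.pySetD ans ki.2 (PySem.List.pyGetD ans ki.2 0 + cost))
    answer

-- ===== PRECONDITION & SPEC =====
-- Exactly where Python A returns: every index must be a valid Python index into
-- both `answer` and `boxes` (else A raises IndexError).
def Pre_sum_moves (answer : List Int) (boxes : String) (boxes_indices : List Int) : Prop :=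
  ∀ i ∈ boxes_indices, PySem.Raise.InRange answer.length i ∧ PySem.Raise.InRange boxes.toList.length i

instance (answer : List Int) (boxes : String) (boxes_indices : List Int) : Decidable (Pre_sum_moves answer boxes boxes_indices) := by unfold Pre_sum_moves; infer_instance

def pvWitness_sum_moves : List Int × String × List Int := ([0, 0, 0], "110", [0, 1, 2])

def Spec_sum_moves (answer : List Int) (boxes : String) (boxes_indices : List Int) (out : List Int) : Prop := out = sum_moves_alt answer boxes boxes_indices
instance (answer : List Int) (boxes : String) (boxes_indices : List Int) (out : List Int) : Decidable (Spec_sum_moves answer boxes boxes_indices out) := by unfold Spec_sum_moves; infer_instance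

-- ===== CLAIM (what is proved, stated in full; the proofs are below) =====
def Claim_equal_sum_moves : Prop := ∀ (answer : List Int) (boxes : String) (boxes_indices : List Int), Dom_sum_moves answer boxes boxes_indices → Pre_sum_moves answer boxes boxes_indices → Spec_sum_moves answer boxes boxes_indices (sum_moves answer boxes boxes_indices)

-- ===== LEMMAS AND PROOFS =====

-- B's inner sum: cost of moving every ball at an earlier traversal position to position k.
def pvCost (boxes : String) (L : List Int) (k : Int) : Int :=
  (PySem.List.pyRange 0 k 1).foldl
    (fun s m =>
      if PySem.Str.pyGet? boxes (PySem.List.pyGetD L m 0) = some '1'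
      then s + (k - m) else s) 0

-- number of balls among the first k traversal positions
def pvCnt (boxes : String) (L : List Int) (k : Int) : Int :=
  (PySem.List.pyRange 0 k 1).foldl
    (fun s m =>
      if PySem.Str.pyGet? boxes (PySem.List.pyGetD L m 0) = some '1'
      then s + 1 else s) 0

theorem pvGetD_append_lt (l : List Int) (x : Int) (m : Int) (h0 : 0 ≤ m) (h : m < (l.length : Int)) :
    PySem.List.pyGetD (l ++ [x]) m 0 = PySem.List.pyGetD l m 0 := by
  rw [PySem.List.pyGetD_of_nonneg (l ++ [x]) 0 h0, PySem.List.pyGetD_of_nonneg l 0 h0]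
  have hm : m.toNat < l.length := by omega
  simp [List.getD, List.getElem?_append_left hm]

theorem pvGetD_append_self (l : List Int) (x : Int) :
    PySem.List.pyGetD (l ++ [x]) (l.length : Int) 0 = x := by
  rw [PySem.List.pyGetD_natCast]
  simp [List.getD]

theorem pvCost_append (boxes : String) (l : List Int) (x : Int) (k : Int)
    (hk : k ≤ (l.length : Int)) :
    pvCost boxes (l ++ [x]) k = pvCost boxes l k := by
  unfold pvCost
  apply PySem.List.foldl_congr_mem
  intro s m hm
  rw [PySem.List.mem_pyRange_one] at hm
  rw [pvGetD_append_lt l x m hm.1 (by omega)]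

theorem pvCnt_append (boxes : String) (l : List Int) (x : Int) (k : Int)
    (hk : k ≤ (l.length : Int)) :
    pvCnt boxes (l ++ [x]) k = pvCnt boxes l k := by
  unfold pvCnt
  apply PySem.List.foldl_congr_mem
  intro s m hm
  rw [PySem.List.mem_pyRange_one] at hm
  rw [pvGetD_append_lt l x m hm.1 (by omega)]

-- shifting the target position by one adds one move per earlier ball
theorem pvFoldl_shift (P : Int → Prop) [DecidablePred P] (r : List Int) (k : Int) :
    ∀ i₁ i₂ : Int,
      r.foldl (fun s m => if P m then s + (k + 1 - m) else s) (i₁ + i₂)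
        = r.foldl (fun s m => if P m then s + (k - m) else s) i₁
          + r.foldl (fun s m => if P m then s + 1 else s) i₂ := by
  induction r with
  | nil => intro i₁ i₂; simp
  | cons a r ih =>
    intro i₁ i₂
    simp only [List.foldl_cons]
    by_cases h : P a
    · simp only [if_pos h]
      have : i₁ + i₂ + (k + 1 - a) = (i₁ + (k - a)) + (i₂ + 1) := by ring
      rw [this, ih]
    · simp only [if_neg h]; exact ih i₁ i₂

theorem pvCost_succ (boxes : String) (L : List Int) (k : Int) (hk : 0 ≤ k) :
    pvCost boxes L (k + 1)
      = pvCost boxes L k + pvCnt boxes L k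
        + (if PySem.Str.pyGet? boxes (PySem.List.pyGetD L k 0) = some '1' then 1 else 0) := by
  unfold pvCost pvCnt
  rw [PySem.List.pyRange_one_succ_right hk, List.foldl_append]
  have := pvFoldl_shift (fun m => PySem.Str.pyGet? boxes (PySem.List.pyGetD L m 0) = some '1')
      (PySem.List.pyRange 0 k 1) k 0 0
  simp only [List.foldl_cons, List.foldl_nil, zero_add] at this ⊢
  split_ifs with h <;> rw [this] <;> ring

theorem pvCnt_succ (boxes : String) (L : List Int) (k : Int) (hk : 0 ≤ k) :
    pvCnt boxes L (k + 1)
      = pvCnt boxes L k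
        + (if PySem.Str.pyGet? boxes (PySem.List.pyGetD L k 0) = some '1' then 1 else 0) := by
  unfold pvCnt
  rw [PySem.List.pyRange_one_succ_right hk, List.foldl_append]
  simp only [List.foldl_cons, List.foldl_nil]
  split_ifs <;> ring

-- B's fold over `enumerate l 0` whose inner lookups use the longer list l ++ [x]
-- computes the same as B on l itself.
theorem pvAltFold_append (answer : List Int) (boxes : String) (l : List Int) (x : Int) :
    (PySem.List.enumerate l 0).foldl
      (fun ans (ki : Int × Int) =>
        PySem.List.pySetD ans ki.2
          (PySem.List.pyGetD ans ki.2 0 + pvCost boxes (l ++ [x]) ki.1)) answer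
    = sum_moves_alt answer boxes l := by
  unfold sum_moves_alt
  apply PySem.List.foldl_congr_mem
  intro ans ki hki
  rw [PySem.List.mem_enumerate_iff] at hki
  obtain ⟨k, hk, rfl⟩ := hki
  show _ = PySem.List.pySetD ans _ (_ + pvCost boxes l _)
  rw [pvCost_append boxes l x _ (by simp; omega)]

-- main invariant: A's fold state after processing l is
-- (B's result on l, cost of the next position, balls seen so far)
theorem pvMain (boxes : String) (l : List Int) (answer : List Int) :
    l.foldl
      (fun (st : List Int × Int × Int) index =>
        let ans := PySem.List.pySetD st.1 index (PySem.List.pyGetD st.1 index 0 + st.2.1)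
        let seen := if PySem.Str.pyGet? boxes index = some '1' then st.2.2 + 1 else st.2.2
        (ans, st.2.1 + seen, seen))
      (answer, 0, 0)
    = (sum_moves_alt answer boxes l,
       pvCost boxes l (l.length : Int),
       pvCnt boxes l (l.length : Int)) := by
  induction l using List.reverseRecOn with
  | nil =>
    simp [sum_moves_alt, pvCost, pvCnt, PySem.List.enumerate, PySem.List.pyRange_one_eq_nil]
  | append_singleton l x ih =>
    rw [List.foldl_append, ih]
    simp only [List.foldl_cons, List.foldl_nil]
    have hlen : ((l ++ [x]).length : Int) = (l.length : Int) + 1 := by simp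
    have hb : PySem.List.pyGetD (l ++ [x]) (l.length : Int) 0 = x := pvGetD_append_self l x
    have hcost : pvCost boxes (l ++ [x]) (l.length : Int) = pvCost boxes l (l.length : Int) :=
      pvCost_append boxes l x _ (by omega)
    have hcnt : pvCnt boxes (l ++ [x]) (l.length : Int) = pvCnt boxes l (l.length : Int) :=
      pvCnt_append boxes l x _ (by omega)
    refine Prod.ext ?_ (Prod.ext ?_ ?_)
    · -- first component: B on l ++ [x]
      show _ = sum_moves_alt answer boxes (l ++ [x])
      unfold sum_moves_alt
      rw [PySem.List.enumerate_append, List.foldl_append]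
      simp only [PySem.List.enumerate_cons, PySem.List.enumerate_nil, List.foldl_cons,
        List.foldl_nil, zero_add]
      rw [show ((PySem.List.enumerate l 0).foldl
            (fun ans (ki : Int × Int) =>
              let cost := (PySem.List.pyRange 0 ki.1 1).foldl
                (fun s m =>
                  if PySem.Str.pyGet? boxes (PySem.List.pyGetD (l ++ [x]) m 0) = some '1'
                  then s + (ki.1 - m) else s) 0
              PySem.List.pySetD ans ki.2 (PySem.List.pyGetD ans ki.2 0 + cost)) answer)
          = sum_moves_alt answer boxes l from pvAltFold_append answer boxes l x]
      show PySem.List.pySetD _ x (_ + pvCost boxes l (l.length : Int))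
          = PySem.List.pySetD _ x (_ + pvCost boxes (l ++ [x]) (l.length : Int))
      rw [hcost]
      rfl
    · -- second component: moves
      show pvCost boxes l (l.length : Int) + _ = pvCost boxes (l ++ [x]) ((l ++ [x]).length : Int)
      rw [hlen, pvCost_succ boxes (l ++ [x]) _ (by omega), hb, hcost, hcnt]
      split_ifs <;> ring
    · -- third component: balls seen
      show _ = pvCnt boxes (l ++ [x]) ((l ++ [x]).length : Int)
      rw [hlen, pvCnt_succ boxes (l ++ [x]) _ (by omega), hb, hcnt]
      split_ifs <;> ring

-- ===== VERDICT (by name: the statement is the Claim_ definition above) =====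
theorem sum_moves_spec : Claim_equal_sum_moves := by
  intro answer boxes boxes_indices _ _
  show sum_moves answer boxes boxes_indices = sum_moves_alt answer boxes boxes_indices
  unfold sum_moves
  rw [pvMain boxes boxes_indices answer]
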